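-- pv_equiv track=rewrite | github.com/zhengweix/leetcode2 | oa.extractMaximum.py | extractMaximum
-- ===== SOURCE A (Python) =====
-- def extractMaximum(s):
--     ans, num = 0, ''
--     for c in s:
--         if c.isdigit():
--             num += c
--         else:
--             if num:
--                 ans = max(int(num), ans)
--             num = ''
--     if num:
--         ans = max(int(num), ans)
--     return ans
-- ===== SOURCE B (Python) =====
-- def extractMaximum(s):
--     # Two-phase: first extract every maximal run of digits, then reduce with max.
--     runs = []
--     i, n = 0, len(s)
--     while i < n:
--         if s[i].isdigit():
--             j = i
--             while j < n and s[j].isdigit():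
--                 j += 1
--             runs.append(s[i:j])
--             i = j
--         else:
--             i += 1
--     return max(map(int, runs), default=0)
-- ===== Notes on version B (the rewrite author's own statement) =====
-- stated objective: alternative
-- what changed: Replaces A's single interleaved loop that accumulates a digit buffer and folds max on each separator with a two-phase structure: an index scan that jumps over each maximal digit run to collect all runs first, then one max-reduce over the extracted runs.
import Mathlib
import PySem

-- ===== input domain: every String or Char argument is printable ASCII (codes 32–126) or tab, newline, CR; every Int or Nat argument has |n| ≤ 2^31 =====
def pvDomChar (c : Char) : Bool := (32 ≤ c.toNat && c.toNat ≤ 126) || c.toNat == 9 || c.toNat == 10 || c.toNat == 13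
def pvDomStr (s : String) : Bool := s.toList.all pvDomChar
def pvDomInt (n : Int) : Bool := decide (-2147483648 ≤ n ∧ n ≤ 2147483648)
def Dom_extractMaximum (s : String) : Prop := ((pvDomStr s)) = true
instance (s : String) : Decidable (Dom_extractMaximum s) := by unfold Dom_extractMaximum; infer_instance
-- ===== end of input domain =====

-- B extracts all maximal digit runs first and then reduces with max, instead of A's
-- interleaved buffer-and-max loop; alternative decomposition, same cost.

-- Shared helper: exact hand port of Python's int() restricted to the nonempty
-- all-'0'..'9' strings that are the only arguments int() receives in both programs.
def pvIntOfDigits (l : List Char) : Int :=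
  l.foldl (fun a c => 10 * a + ((c.toNat : Int) - 48)) 0

-- ===== PORT A =====
def pvStepA (st : Int × List Char) (c : Char) : Int × List Char :=
  if PySem.Chars.isdigit c then (st.1, st.2 ++ [c])
  else ((if st.2 ≠ [] then max (pvIntOfDigits st.2) st.1 else st.1), [])

def extractMaximum (s : String) : Int :=
  let st := s.toList.foldl pvStepA (0, [])
  if st.2 ≠ [] then max (pvIntOfDigits st.2) st.1 else st.1

-- ===== PORT B =====
-- the outer index scan of Source B: collect each maximal digit run, jumping past it
def pvDigitRuns : List Char → List (List Char)
  | [] => []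
  | c :: cs =>
    if PySem.Chars.isdigit c then
      (c :: cs.takeWhile PySem.Chars.isdigit) :: pvDigitRuns (cs.dropWhile PySem.Chars.isdigit)
    else
      pvDigitRuns cs
  termination_by l => l.length
  decreasing_by
  · exact Nat.lt_succ_of_le (List.length_dropWhile_le _ _)
  · exact Nat.lt_succ_self _

def extractMaximum_alt (s : String) : Int :=
  ((pvDigitRuns s.toList).map pvIntOfDigits).foldl (fun a v => max a v) 0

-- ===== PRECONDITION & SPEC =====
def Spec_extractMaximum (s : String) (out : Int) : Prop := out = extractMaximum_alt s
instance (s : String) (out : Int) : Decidable (Spec_extractMaximum s out) := by unfold Spec_extractMaximum; infer_instance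

-- ===== CLAIM (what is proved, stated in full; the proofs are below) =====
def Claim_equal_extractMaximum : Prop := ∀ (s : String), Dom_extractMaximum s → Spec_extractMaximum s (extractMaximum s)

-- ===== LEMMAS AND PROOFS =====

-- finalisation of A's loop state
def pvFinA (st : Int × List Char) : Int :=
  if st.2 ≠ [] then max (pvIntOfDigits st.2) st.1 else st.1

theorem pvRun (cs : List Char) (ans : Int) (num : List Char) :
    List.foldl pvStepA (ans, num) cs =
      List.foldl pvStepA (ans, num ++ cs.takeWhile PySem.Chars.isdigit)
        (cs.dropWhile PySem.Chars.isdigit) := by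
  induction cs generalizing num with
  | nil => simp
  | cons c cs ih =>
    by_cases h : PySem.Chars.isdigit c = true
    · simp only [List.foldl_cons, List.takeWhile_cons, List.dropWhile_cons, h, if_pos]
      rw [show pvStepA (ans, num) c = (ans, num ++ [c]) by simp [pvStepA, h]]
      rw [ih (num ++ [c])]
      simp
    · simp [h]

theorem pvSkipEmpty (ans : Int) (c : Char) (h : ¬ PySem.Chars.isdigit c = true) :
    pvStepA (ans, []) c = (ans, []) := by
  simp [pvStepA, h]

theorem pvMain (l : List Char) (ans : Int) :
    pvFinA (List.foldl pvStepA (ans, []) l) =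
      List.foldl (fun a g => max a (pvIntOfDigits g)) ans (pvDigitRuns l) := by
  induction l using pvDigitRuns.induct generalizing ans with
  | case1 => simp [pvFinA, pvDigitRuns]
  | case2 c cs h ih =>
    have hstep : pvStepA (ans, []) c = (ans, [c]) := by simp [pvStepA, h]
    rw [List.foldl_cons, hstep, pvRun]
    have hrunfin :
        pvFinA (List.foldl pvStepA (ans, [c] ++ cs.takeWhile PySem.Chars.isdigit)
          (cs.dropWhile PySem.Chars.isdigit)) =
        pvFinA (List.foldl pvStepA
          (max (pvIntOfDigits (c :: cs.takeWhile PySem.Chars.isdigit)) ans, [])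
          (cs.dropWhile PySem.Chars.isdigit)) := by
      cases hr : cs.dropWhile PySem.Chars.isdigit with
      | nil => simp [pvFinA, List.cons_append]
      | cons d r =>
        have hd : ¬ PySem.Chars.isdigit d = true := by
          intro hdig
          have := List.head?_dropWhile_not PySem.Chars.isdigit cs
          rw [hr] at this; simp [hdig] at this
        simp only [List.foldl_cons]
        rw [show pvStepA (ans, [c] ++ cs.takeWhile PySem.Chars.isdigit) d =
              (max (pvIntOfDigits (c :: cs.takeWhile PySem.Chars.isdigit)) ans, []) by
            simp [pvStepA, hd], pvSkipEmpty _ _ hd]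
    rw [hrunfin, ih]
    simp [pvDigitRuns, h, max_comm]
  | case3 c cs h ih =>
    rw [List.foldl_cons, pvSkipEmpty _ _ h, ih, pvDigitRuns]
    simp [h]

-- ===== VERDICT (by name: the statement is the Claim_ definition above) =====
theorem extractMaximum_spec : Claim_equal_extractMaximum := by
  intro s _
  show extractMaximum s = extractMaximum_alt s
  unfold extractMaximum extractMaximum_alt
  rw [List.foldl_map]
  exact pvMain s.toList 0
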